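-- pv_equiv track=rewrite | github.com/matzayonc/agh | asd/kol1a/kol1a.py | counting_on_position
-- ===== SOURCE A (Python) =====
-- def counting_on_position(T, p):
--
--     def to_index(c):
--         return ord(c) - ord('a')
--
--     base = ord('z') - ord('a') + 2
--     last = to_index('z') + 1
--
--     M = [0 for _ in range(base + 2)]
--
--     for t in T:
--         if len(t) <= p:
--             M[last] += 1
--         else:
--             M[to_index(t[p])] += 1
--
--     for i in range(1, len(M)):
--         M[i] += M[i-1]
--
--     A = [None for _ in range(len(T))]
--
--     for i in range(len(T)-1, -1, -1):
--         if len(T[i]) <= p: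
--             M[last] -= 1
--             A[M[last]] = T[i]
--         else:
--             M[to_index(T[i][p])] -= 1
--             A[M[to_index(T[i][p])]] = T[i]
--
--     return A
-- ===== SOURCE B (Python) =====
-- def counting_on_position(T, p):
--
--     def to_index(c):
--         return ord(c) - ord('a')
--
--     base = ord('z') - ord('a') + 2
--     last = to_index('z') + 1
--
--     buckets = [[] for _ in range(base + 2)]
--
--     for t in T:
--         if len(t) <= p:
--             buckets[last].append(t)
--         else:
--             buckets[to_index(t[p])].append(t)
--
--     A = []
--     for b in buckets:
--         A.extend(b)
--     return A
-- ===== Notes on version B (the rewrite author's own statement) =====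
-- stated objective: simpler
-- what changed: Replaces A's three-pass counting sort (count occurrences, prefix-sum the 29-slot table, place elements backward into a preallocated array) by a single forward pass that appends each string to one of the same 29 buckets, then concatenates the buckets in index order.
import Mathlib
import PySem

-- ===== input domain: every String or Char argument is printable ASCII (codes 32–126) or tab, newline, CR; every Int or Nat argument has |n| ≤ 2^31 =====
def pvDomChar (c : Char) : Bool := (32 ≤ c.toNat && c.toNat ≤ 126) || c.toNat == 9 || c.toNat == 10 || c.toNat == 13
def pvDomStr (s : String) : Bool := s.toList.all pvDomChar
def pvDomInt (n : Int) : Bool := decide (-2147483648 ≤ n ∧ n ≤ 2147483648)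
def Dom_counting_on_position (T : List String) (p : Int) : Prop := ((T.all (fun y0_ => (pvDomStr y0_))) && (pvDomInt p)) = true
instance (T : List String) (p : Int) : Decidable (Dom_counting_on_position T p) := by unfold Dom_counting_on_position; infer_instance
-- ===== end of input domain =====

-- B replaces A's three-pass counting sort (count, prefix-sum, backward placement) by a single
-- forward pass appending into the same 29 buckets followed by concatenation: same result, simpler.

-- ===== PORT A =====
-- `to_index(c)` of the Python
def pvToIndex (c : Char) : Int := (c.toNat : Int) - 97

-- Python's `M[i] += v` (a negative i counts from the end; where Python would raise
-- IndexError — excluded by Pre_ — this is a no-op)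
def pvAddAt (M : List Int) (i : Int) (v : Int) : List Int :=
  PySem.List.pySetD M i (PySem.List.pyGetD M i 0 + v)

-- body of A's first (counting) loop; `last = to_index('z') + 1 = 26`
def pvCountStep (p : Int) (M : List Int) (t : String) : List Int :=
  if PySem.Str.len t ≤ p then pvAddAt M 26 1
  else match PySem.Str.pyGet? t p with
    | some c => pvAddAt M (pvToIndex c) 1
    | none => M

-- body of A's prefix-sum loop: `M[i] += M[i-1]`
def pvPrefixStep (M : List Int) (i : Int) : List Int :=
  PySem.List.pySetD M i (PySem.List.pyGetD M i 0 + PySem.List.pyGetD M (i - 1) 0)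

-- body of A's backward placement loop, for t = T[i]
def pvPlace (p : Int) (t : String) (st : List Int × List (Option String)) :
    List Int × List (Option String) :=
  if PySem.Str.len t ≤ p then
    let M' := pvAddAt st.1 26 (-1)
    (M', PySem.List.pySetD st.2 (PySem.List.pyGetD M' 26 0) (some t))
  else match PySem.Str.pyGet? t p with
    | some c =>
      let M' := pvAddAt st.1 (pvToIndex c) (-1)
      (M', PySem.List.pySetD st.2 (PySem.List.pyGetD M' (pvToIndex c) 0) (some t))
    | none => st

-- literal port of A (base = 27, last = 26). Python initialises A with None; under Pre_ the loop
-- fills every slot, so the final `.map` only strips the Option layer of that None-initialisation.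
def counting_on_position (T : List String) (p : Int) : List String :=
  let base : Int := 122 - 97 + 2
  let M0 : List Int := List.replicate (base + 2).toNat 0
  let M1 := T.foldl (pvCountStep p) M0
  let M2 := (PySem.List.pyRange 1 (M1.length : Int) 1).foldl pvPrefixStep M1
  let A0 : List (Option String) := List.replicate T.length none
  let st := (PySem.List.pyRange ((T.length : Int) - 1) (-1) (-1)).foldl
      (fun st i => match PySem.List.pyGet? T i with
        | some t => pvPlace p t st
        | none => st) (M2, A0)
  st.2.map (fun o => o.getD "")

-- ===== PORT B =====
-- Python's `buckets[i].append(t)` (a negative i counts from the end; where Python would raise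
-- IndexError — excluded by Pre_ — this is a no-op)
def pvAppendAt (B : List (List String)) (i : Int) (t : String) : List (List String) :=
  PySem.List.pySetD B i (PySem.List.pyGetD B i [] ++ [t])

-- body of B's single bucket-filling loop
def pvBucketStep (p : Int) (B : List (List String)) (t : String) : List (List String) :=
  if PySem.Str.len t ≤ p then pvAppendAt B 26 t
  else match PySem.Str.pyGet? t p with
    | some c => pvAppendAt B (pvToIndex c) t
    | none => B

-- literal port of B: fill the 29 buckets in one forward pass, then concatenate them
def counting_on_position_alt (T : List String) (p : Int) : List String :=
  let base : Int := 122 - 97 + 2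
  let buckets := T.foldl (pvBucketStep p) (List.replicate (base + 2).toNat [])
  buckets.foldl (fun A b => A ++ b) []

-- ===== PRECONDITION & SPEC =====
-- Pre_ = exactly the inputs on which the Python A returns (no IndexError): every string either
-- has length ≤ p, or its character at position p exists and has code in [68,125], so that the
-- table index to_index(c) ∈ [-29,28] is in range for the 29-slot table.
def Pre_counting_on_position (T : List String) (p : Int) : Prop :=
  ∀ t ∈ T, PySem.Str.len t ≤ p ∨
    ((PySem.Str.pyGet? t p).any fun c => decide (68 ≤ c.toNat ∧ c.toNat ≤ 125)) = true
instance (T : List String) (p : Int) : Decidable (Pre_counting_on_position T p) := by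
  unfold Pre_counting_on_position; infer_instance

def pvWitness_counting_on_position : List String × Int := (["ba", "ab", ""], 0)

def Spec_counting_on_position (T : List String) (p : Int) (out : List String) : Prop := out = counting_on_position_alt T p
instance (T : List String) (p : Int) (out : List String) : Decidable (Spec_counting_on_position T p out) := by unfold Spec_counting_on_position; infer_instance

-- ===== CLAIM (what is proved, stated in full; the proofs are below) =====
def Claim_equal_counting_on_position : Prop := ∀ (T : List String) (p : Int), Dom_counting_on_position T p → Pre_counting_on_position T p → Spec_counting_on_position T p (counting_on_position T p)

-- ===== LEMMAS AND PROOFS =====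

-- the per-string precondition (the body of Pre_)
def pvOk (p : Int) (t : String) : Prop :=
  PySem.Str.len t ≤ p ∨
    ((PySem.Str.pyGet? t p).any fun c => decide (68 ≤ c.toNat ∧ c.toNat ≤ 125)) = true

def pvKey (p : Int) (t : String) : Nat :=
  if PySem.Str.len t ≤ p then 26
  else match PySem.Str.pyGet? t p with
    | some c => (((c.toNat : Int) - 97) % 29).toNat
    | none => 0

def pvCnt (p : Int) (j : Nat) (S : List String) : Nat := S.countP (fun t => pvKey p t == j)

def pvOff (p : Int) (j : Nat) (T : List String) : Nat :=
  ((List.range j).map (fun j' => pvCnt p j' T)).sum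

def pvTarget (p : Int) (T : List String) : List String :=
  ((List.range 29).map (fun j => T.filter (fun t => pvKey p t == j))).flatten

lemma pvKey_lt (p : Int) (t : String) : pvKey p t < 29 := by
  unfold pvKey
  split
  · omega
  · split
    · omega
    · omega

lemma getD_set_self {α : Type} (l : List α) (i : Nat) (h : i < l.length) (v d : α) :
    (l.set i v).getD i d = v := by
  simp [List.getD_eq_getElem?_getD, h]

lemma getD_set_ne {α : Type} (l : List α) (i j : Nat) (h : i ≠ j) (v d : α) :
    (l.set i v).getD j d = l.getD j d := by
  simp [List.getD_eq_getElem?_getD, List.getElem?_set_ne h]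

lemma pyGetD_29 {α : Type} (M : List α) (i : Int) (hl : M.length = 29)
    (h1 : -29 ≤ i) (h2 : i < 29) (d : α) :
    PySem.List.pyGetD M i d = M.getD ((i % 29).toNat) d := by
  simp only [PySem.List.pyGetD, PySem.List.pyGet?, PySem.List.pyIdx?, hl]
  rcases le_or_gt 0 i with h | h
  · have hm : i % 29 = i := Int.emod_eq_of_lt h h2
    simp [h, h2, hm, Option.bind, List.getD_eq_getElem?_getD]
  · have hm : (i % 29).toNat = 29 - (-i).toNat := by omega
    simp [not_le.mpr h, h1, hm, Option.bind, List.getD_eq_getElem?_getD]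

lemma pySetD_29 {α : Type} (M : List α) (i : Int) (hl : M.length = 29)
    (h1 : -29 ≤ i) (h2 : i < 29) (v : α) :
    PySem.List.pySetD M i v = M.set ((i % 29).toNat) v := by
  simp only [PySem.List.pySetD, PySem.List.pySet?, PySem.List.pyIdx?, hl]
  rcases le_or_gt 0 i with h | h
  · have hm : i % 29 = i := Int.emod_eq_of_lt h h2
    simp [h, h2, hm]
  · have hm : (i % 29).toNat = 29 - (-i).toNat := by omega
    simp [not_le.mpr h, h1, hm]

lemma pvOk_index (p : Int) (t : String) (hok : pvOk p t) (hnp : ¬ PySem.Str.len t ≤ p) :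
    ∃ c, PySem.Str.pyGet? t p = some c ∧ -29 ≤ pvToIndex c ∧ pvToIndex c < 29 ∧
      ((pvToIndex c) % 29).toNat = pvKey p t := by
  rcases hok with h | h
  · exact absurd h hnp
  · cases hc : PySem.Str.pyGet? t p with
    | none => rw [hc] at h; simp [Option.any] at h
    | some c =>
      rw [hc] at h
      simp [Option.any] at h
      refine ⟨c, rfl, by simp [pvToIndex]; omega, by simp [pvToIndex]; omega, ?_⟩
      unfold pvKey
      rw [if_neg hnp, hc]
      dsimp only
      rfl

lemma pvCountStep_eq (p : Int) (t : String) (M : List Int) (hM : M.length = 29)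
    (hok : pvOk p t) :
    pvCountStep p M t = M.set (pvKey p t) (M.getD (pvKey p t) 0 + 1) := by
  unfold pvCountStep pvAddAt
  by_cases hp : PySem.Str.len t ≤ p
  · rw [if_pos hp]
    rw [pySetD_29 M 26 hM (by norm_num) (by norm_num),
        pyGetD_29 M 26 hM (by norm_num) (by norm_num)]
    have h26 : ((26:Int) % 29).toNat = 26 := by decide
    have hkey : pvKey p t = 26 := by unfold pvKey; rw [if_pos hp]
    rw [h26, hkey]
  · rw [if_neg hp]
    obtain ⟨c, hc, hb1, hb2, hkey⟩ := pvOk_index p t hok hp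
    rw [hc]
    dsimp only
    rw [pySetD_29 M _ hM hb1 hb2, pyGetD_29 M _ hM hb1 hb2, hkey]

lemma pvBucketStep_eq (p : Int) (t : String) (B : List (List String)) (hB : B.length = 29)
    (hok : pvOk p t) :
    pvBucketStep p B t = B.set (pvKey p t) (B.getD (pvKey p t) [] ++ [t]) := by
  unfold pvBucketStep pvAppendAt
  by_cases hp : PySem.Str.len t ≤ p
  · rw [if_pos hp]
    rw [pySetD_29 B 26 hB (by norm_num) (by norm_num),
        pyGetD_29 B 26 hB (by norm_num) (by norm_num)]
    have h26 : ((26:Int) % 29).toNat = 26 := by decide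
    have hkey : pvKey p t = 26 := by unfold pvKey; rw [if_pos hp]
    rw [h26, hkey]
  · rw [if_neg hp]
    obtain ⟨c, hc, hb1, hb2, hkey⟩ := pvOk_index p t hok hp
    rw [hc]
    dsimp only
    rw [pySetD_29 B _ hB hb1 hb2, pyGetD_29 B _ hB hb1 hb2, hkey]

lemma pvPlace_eq (p : Int) (t : String) (M : List Int) (A : List (Option String))
    (hM : M.length = 29) (hok : pvOk p t) :
    pvPlace p t (M, A) =
      (M.set (pvKey p t) (M.getD (pvKey p t) 0 - 1),
       PySem.List.pySetD A (M.getD (pvKey p t) 0 - 1) (some t)) := by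
  unfold pvPlace pvAddAt
  by_cases hp : PySem.Str.len t ≤ p
  · rw [if_pos hp]
    dsimp only
    have hkey : pvKey p t = 26 := by unfold pvKey; rw [if_pos hp]
    rw [pySetD_29 M 26 hM (by norm_num) (by norm_num),
        pyGetD_29 M 26 hM (by norm_num) (by norm_num)]
    have h26 : ((26:Int) % 29).toNat = 26 := by decide
    rw [h26, hkey]
    rw [pyGetD_29 _ 26 (by simpa using hM) (by norm_num) (by norm_num), h26]
    rw [getD_set_self _ _ (by omega)]
    norm_num [sub_eq_add_neg]
  · rw [if_neg hp]
    obtain ⟨c, hc, hb1, hb2, hkey⟩ := pvOk_index p t hok hp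
    rw [hc]
    dsimp only
    rw [pySetD_29 M _ hM hb1 hb2, pyGetD_29 M _ hM hb1 hb2, hkey]
    rw [pyGetD_29 _ _ (by simpa using hM) hb1 hb2, hkey]
    rw [getD_set_self _ _ (by simp [hM, ← hkey]; omega)]
    norm_num [sub_eq_add_neg]

lemma pvCnt_cons (p : Int) (j : Nat) (t : String) (S : List String) :
    pvCnt p j (t :: S) = pvCnt p j S + (if pvKey p t = j then 1 else 0) := by
  simp [pvCnt, List.countP_cons]

lemma pvCnt_pos_of_key (p : Int) (t : String) (S : List String) :
    1 ≤ pvCnt p (pvKey p t) (t :: S) := by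
  simp [pvCnt]

lemma countLoop (p : Int) (S : List String) (M : List Int) (hM : M.length = 29)
    (hok : ∀ t ∈ S, pvOk p t) :
    (S.foldl (pvCountStep p) M).length = 29 ∧
    ∀ j, j < 29 → (S.foldl (pvCountStep p) M).getD j 0 = M.getD j 0 + (pvCnt p j S : Int) := by
  induction S generalizing M with
  | nil => simp [pvCnt, hM]
  | cons t S ih =>
    rw [List.foldl_cons, pvCountStep_eq p t M hM (hok t (by simp))]
    obtain ⟨ihl, ihv⟩ := ih (M.set (pvKey p t) (M.getD (pvKey p t) 0 + 1))
      (by simp [hM]) (fun t' ht' => hok t' (by simp [ht']))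
    refine ⟨ihl, fun j hj => ?_⟩
    rw [ihv j hj, pvCnt_cons]
    by_cases hk : pvKey p t = j
    · rw [← hk, getD_set_self _ _ (by rw [hM]; exact pvKey_lt p t)]
      simp [hk]
      ring
    · rw [getD_set_ne _ _ _ hk]
      simp [hk]

lemma bucketLoop (p : Int) (S : List String) (B : List (List String)) (hB : B.length = 29)
    (hok : ∀ t ∈ S, pvOk p t) :
    (S.foldl (pvBucketStep p) B).length = 29 ∧
    ∀ j, j < 29 → (S.foldl (pvBucketStep p) B).getD j [] =
      B.getD j [] ++ S.filter (fun t => pvKey p t == j) := by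
  induction S generalizing B with
  | nil => simp [hB]
  | cons t S ih =>
    rw [List.foldl_cons, pvBucketStep_eq p t B hB (hok t (by simp))]
    obtain ⟨ihl, ihv⟩ := ih (B.set (pvKey p t) (B.getD (pvKey p t) [] ++ [t]))
      (by simp [hB]) (fun t' ht' => hok t' (by simp [ht']))
    refine ⟨ihl, fun j hj => ?_⟩
    rw [ihv j hj, List.filter_cons]
    by_cases hk : pvKey p t = j
    · rw [← hk, getD_set_self _ _ (by rw [hB]; exact pvKey_lt p t)]
      simp [hk]
    · rw [getD_set_ne _ _ _ hk]
      simp [hk]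

lemma prefixLoop (b : Nat) (hb1 : 1 ≤ b) (hb : b ≤ 29) (M : List Int) (hM : M.length = 29) :
    ((PySem.List.pyRange 1 (b : Int) 1).foldl pvPrefixStep M).length = 29 ∧
    ∀ j, j < 29 → ((PySem.List.pyRange 1 (b : Int) 1).foldl pvPrefixStep M).getD j 0 =
      if j < b then ((List.range (j + 1)).map (fun j' => M.getD j' 0)).sum else M.getD j 0 := by
  induction b with
  | zero => omega
  | succ b ih =>
    rcases Nat.eq_or_lt_of_le hb1 with h1 | h1
    · -- b + 1 = 1 : empty range
      have hb0 : b = 0 := by omega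
      subst hb0
      have : PySem.List.pyRange 1 ((1:Nat) : Int) 1 = [] := by decide
      rw [this]
      refine ⟨hM, fun j hj => ?_⟩
      simp only [List.foldl_nil]
      by_cases hj0 : j < 1
      · have : j = 0 := by omega
        subst this
        simp
      · rw [if_neg hj0]
    · -- 1 ≤ b
      have hble : 1 ≤ b := by omega
      obtain ⟨ihl, ihv⟩ := ih hble (by omega)
      have hr : PySem.List.pyRange 1 ((b+1 : Nat) : Int) 1 = PySem.List.pyRange 1 (b : Int) 1 ++ [(b:Int)] := by
        push_cast
        exact PySem.List.pyRange_one_succ_right (by exact_mod_cast hble)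
      rw [hr, List.foldl_append]
      set F := (PySem.List.pyRange 1 (b : Int) 1).foldl pvPrefixStep M with hF
      simp only [List.foldl_cons, List.foldl_nil]
      unfold pvPrefixStep
      have hFl : F.length = 29 := ihl
      have hbint : ((b:Int) % 29).toNat = b := by omega
      have hbint1 : (((b:Int)-1) % 29).toNat = b - 1 := by omega
      rw [pySetD_29 F _ hFl (by omega) (by omega), pyGetD_29 F _ hFl (by omega) (by omega),
          pyGetD_29 F _ hFl (by omega) (by omega), hbint, hbint1]
      constructor
      · simp [hFl]
      · intro j hj
        by_cases hjb : j = b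
        · subst hjb
          rw [getD_set_self _ _ (by omega)]
          rw [if_pos (by omega)]
          rw [ihv j (by omega), ihv (j-1) (by omega)]
          rw [if_neg (by omega), if_pos (by omega)]
          have : j - 1 + 1 = j := by omega
          rw [this]
          rw [List.range_succ]
          simp [add_comm]
        · rw [getD_set_ne _ _ _ (by omega)]
          rw [ihv j hj]
          by_cases hjlt : j < b
          · rw [if_pos hjlt, if_pos (by omega)]
          · rw [if_neg hjlt, if_neg (by omega)]

lemma pyRange_rev (n : Nat) : PySem.List.pyRange ((n : Int) - 1) (-1) (-1)
    = List.map (fun k : Nat => (k : Int)) (List.range n).reverse := by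
  unfold PySem.List.pyRange
  rw [if_neg (by norm_num)]
  rcases Nat.eq_zero_or_pos n with h | h
  · subst h; simp
  · rw [if_neg (by norm_num), if_pos (by omega)]
    have hc : (((n:Int) - 1 - (-1) + - (-1) - 1) / - (-1)).toNat = n := by
      have : ((n:Int) - 1 - (-1) + - (-1) - 1) / - (-1) = (n : Int) := by norm_num
      rw [this, Int.toNat_natCast]
    rw [hc]
    apply List.ext_getElem
    · simp
    · intro i h1 h2
      have h2' : i < n := by simpa using h1
      rw [List.getElem_map, List.getElem_map, List.getElem_reverse, List.getElem_range, List.getElem_range]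
      simp only [List.length_range]
      omega

lemma foldr_index (p : Int) (T : List String) :
    ∀ st : List Int × List (Option String),
    (List.range T.length).foldr
      (fun (i : Nat) st => match PySem.List.pyGet? T (i : Int) with
        | some t => pvPlace p t st
        | none => st) st = T.foldr (pvPlace p) st := by
  induction T using List.reverseRecOn with
  | nil => intro st; simp
  | append_singleton T t ih =>
    intro st
    rw [List.length_append, List.length_singleton, List.range_succ, List.foldr_append]
    simp only [List.foldr_cons, List.foldr_nil]
    have hlast : PySem.List.pyGet? (T ++ [t]) ((T.length : Nat) : Int) = some t :=
      PySem.List.pyGet?_append_length T [] t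
    rw [hlast]
    have hbody : ∀ (i : Nat), i ∈ List.range T.length → ∀ st',
        (match PySem.List.pyGet? (T ++ [t]) (i : Int) with
          | some u => pvPlace p u st'
          | none => st') =
        (match PySem.List.pyGet? T (i : Int) with
          | some u => pvPlace p u st'
          | none => st') := by
      intro i hi st'
      rw [PySem.List.pyGet?_natCast, PySem.List.pyGet?_natCast,
          List.getElem?_append_left (by simpa using hi)]
    rw [List.foldr_ext _ _ _ hbody, ih (pvPlace p t st), List.foldr_append]
    simp

lemma placeLoop (p : Int) (S : List String) (M : List Int) (A : List (Option String))
    (hM : M.length = 29)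
    (hok : ∀ t ∈ S, pvOk p t)
    (hdisj : ∀ j1 j2, j1 < j2 → j2 < 29 →
      M.getD j1 0 ≤ M.getD j2 0 - (pvCnt p j2 S : Int))
    (hlo : ∀ j, j < 29 → 0 ≤ M.getD j 0 - (pvCnt p j S : Int))
    (hhi : ∀ j, j < 29 → M.getD j 0 ≤ (A.length : Int)) :
    (S.foldr (pvPlace p) (M, A)).1.length = 29 ∧
    (S.foldr (pvPlace p) (M, A)).2.length = A.length ∧
    (∀ j, j < 29 → (S.foldr (pvPlace p) (M, A)).1.getD j 0 = M.getD j 0 - (pvCnt p j S : Int)) ∧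
    (∀ j, j < 29 → ∀ r : Nat, r < pvCnt p j S →
      (S.foldr (pvPlace p) (M, A)).2.getD ((M.getD j 0 - (pvCnt p j S : Int) + r).toNat) none =
        (S.filter (fun t => pvKey p t == j))[r]?) := by
  induction S with
  | nil =>
    refine ⟨hM, rfl, by simp [pvCnt], by intro j hj r hr; simp [pvCnt] at hr⟩
  | cons t S ih =>
    have hcnt_le : ∀ j, (pvCnt p j S : Int) ≤ (pvCnt p j (t :: S) : Int) := by
      intro j
      rw [pvCnt_cons]
      split <;> omega
    obtain ⟨ih1, ih2, ih3, ih4⟩ := ih (fun u hu => hok u (by simp [hu]))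
      (fun j1 j2 h12 h2 => le_trans (hdisj j1 j2 h12 h2) (by have := hcnt_le j2; omega))
      (fun j hj => le_trans (hlo j hj) (by have := hcnt_le j; omega))
    set R := S.foldr (pvPlace p) (M, A) with hR
    set k := pvKey p t with hk
    have hklt : k < 29 := pvKey_lt p t
    have hcons : (t :: S).foldr (pvPlace p) (M, A) = pvPlace p t R := rfl
    have hval : R.1.getD k 0 = M.getD k 0 - (pvCnt p k S : Int) := ih3 k hklt
    have hckt : pvCnt p k (t :: S) = pvCnt p k S + 1 := by
      rw [pvCnt_cons, if_pos rfl]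
    have hpos0 : (0:Int) ≤ M.getD k 0 - (pvCnt p k (t :: S) : Int) := hlo k hklt
    have hposA : M.getD k 0 ≤ (A.length : Int) := hhi k hklt
    have hplace : pvPlace p t R =
        (R.1.set k (R.1.getD k 0 - 1), PySem.List.pySetD R.2 (R.1.getD k 0 - 1) (some t)) := by
      rw [(by exact (Prod.mk.eta).symm : R = (R.1, R.2))]
      exact pvPlace_eq p t R.1 R.2 ih1 (hok t (by simp))
    have hposval : R.1.getD k 0 - 1 = M.getD k 0 - (pvCnt p k (t :: S) : Int) := by
      rw [hval, hckt]; push_cast; ring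
    have hsetA : PySem.List.pySetD R.2 (R.1.getD k 0 - 1) (some t) =
        R.2.set (R.1.getD k 0 - 1).toNat (some t) :=
      PySem.List.pySetD_of_nonneg R.2 (some t) (by rw [hposval]; exact hpos0)
    rw [hcons, hplace, hsetA]
    refine ⟨by simp [ih1], by simp [ih2], ?_, ?_⟩
    · intro j hj
      by_cases hjk : j = k
      · subst hjk
        rw [getD_set_self _ _ (by omega), hval, hckt]
        push_cast; ring
      · rw [getD_set_ne _ _ _ (fun h => hjk h.symm), ih3 j hj, pvCnt_cons,
            if_neg (by exact fun h => hjk h.symm)]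
        simp
    · intro j hj r hr
      by_cases hjk : j = k
      · rw [hjk] at hr ⊢
        rw [List.filter_cons_of_pos (by simp [hk])]
        rcases Nat.eq_zero_or_pos r with hr0 | hrpos
        · subst hr0
          have hq : (M.getD k 0 - (pvCnt p k (t :: S) : Int) + ((0:Nat) : Int)).toNat
              = (R.1.getD k 0 - 1).toNat := by rw [hposval]; push_cast; ring_nf
          rw [hq, getD_set_self _ _ (by rw [ih2]; omega)]
          simp
        · obtain ⟨r', rfl⟩ : ∃ r', r = r' + 1 := ⟨r - 1, by omega⟩
          have hq : (M.getD k 0 - (pvCnt p k (t :: S) : Int) + ((r' + 1 : Nat) : Int)).toNat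
              = (M.getD k 0 - (pvCnt p k S : Int) + ((r' : Nat) : Int)).toNat := by
            rw [hckt]; push_cast; ring_nf
          have hne : (M.getD k 0 - (pvCnt p k S : Int) + ((r' : Nat) : Int)).toNat
              ≠ (R.1.getD k 0 - 1).toNat := by
            have h1 : (0:Int) ≤ M.getD k 0 - (pvCnt p k S : Int) + ((r' : Nat) : Int) := by
              have := hlo k hklt; have := hcnt_le k; omega
            rw [hposval, hckt]
            push_cast
            omega
          rw [hq, getD_set_ne _ _ _ (Ne.symm hne), ih4 k hklt r' (by omega)]
          simp
      · have hkj : pvKey p t ≠ j := fun h => hjk h.symm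
        have hcj : pvCnt p j (t :: S) = pvCnt p j S := by
          rw [pvCnt_cons, if_neg hkj]
          omega
        rw [List.filter_cons_of_neg (by simp [hkj])]
        have hq0 : (0:Int) ≤ M.getD j 0 - (pvCnt p j S : Int) + (r : Nat) := by
          have := hlo j hj; have := hcnt_le j; omega
        have hne : (M.getD j 0 - (pvCnt p j S : Int) + (r : Nat)).toNat
            ≠ (R.1.getD k 0 - 1).toNat := by
          rcases Nat.lt_or_ge j k with hlt | hge
          · -- j < k : position < M j ≤ M k - cnt k (t::S) = pos
            have hd := hdisj j k hlt hklt
            have : (M.getD j 0 - (pvCnt p j S : Int) + (r : Nat)) < M.getD j 0 := by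
              rw [hcj] at hr; omega
            rw [hposval]
            omega
          · have hlt : k < j := by omega
            have hd := hdisj k j hlt hj
            have h1 := pvCnt_pos_of_key p t S
            rw [← hk] at h1
            rw [hposval]
            rw [hcj] at hr hd
            have hck := hckt
            have := hlo k hklt
            omega
        have hq : (M.getD j 0 - (pvCnt p j (t :: S) : Int) + (r : Nat)).toNat
            = (M.getD j 0 - (pvCnt p j S : Int) + (r : Nat)).toNat := by rw [hcj]
        rw [hq, getD_set_ne _ _ _ (Ne.symm hne), ih4 j hj r (by rw [← hcj]; exact hr)]

lemma pvOff_succ (p : Int) (j : Nat) (T : List String) :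
    pvOff p (j + 1) T = pvOff p j T + pvCnt p j T := by
  simp [pvOff, List.range_succ]

lemma pvOff_mono (p : Int) (T : List String) {j1 j2 : Nat} (h : j1 ≤ j2) :
    pvOff p j1 T ≤ pvOff p j2 T := by
  induction j2, h using Nat.le_induction with
  | base => exact le_refl _
  | succ j2 hle ih => rw [pvOff_succ]; omega

lemma sum_indicator (k n : Nat) :
    ((List.range n).map (fun j => if k = j then 1 else 0)).sum = if k < n then 1 else 0 := by
  induction n with
  | zero => simp
  | succ n ih =>
    rw [List.range_succ, List.map_append, List.sum_append, ih]
    by_cases h : k = n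
    · subst h; simp
    · by_cases h2 : k < n
      · rw [if_pos h2, if_pos (by omega)]; simp [h]
      · rw [if_neg h2, if_neg (by omega)]; simp [h]

lemma pvOff_cons (p : Int) (n : Nat) (t : String) (S : List String) :
    pvOff p n (t :: S) = pvOff p n S + (if pvKey p t < n then 1 else 0) := by
  unfold pvOff
  have hmap : (List.range n).map (fun j' => pvCnt p j' (t :: S)) =
      (List.range n).map (fun j' => pvCnt p j' S + (if pvKey p t = j' then 1 else 0)) := by
    apply List.map_congr_left
    intro j' _
    rw [pvCnt_cons]
  rw [hmap, List.sum_map_add, sum_indicator]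

lemma pvOff_total (p : Int) (T : List String) :
    pvOff p 29 T = T.length := by
  induction T with
  | nil => simp [pvOff, pvCnt]
  | cons t S ih =>
    rw [pvOff_cons, ih, if_pos (pvKey_lt p t)]
    simp

lemma pvCnt_eq_length_filter (p : Int) (j : Nat) (T : List String) :
    pvCnt p j T = (T.filter (fun t => pvKey p t == j)).length := by
  simp [pvCnt, List.countP_eq_length_filter]

lemma assemble (p : Int) (T : List String) (L : List (Option String))
    (hlen : L.length = T.length)
    (hplaced : ∀ j, j < 29 → ∀ r, r < pvCnt p j T →
      L.getD (pvOff p j T + r) none = (T.filter (fun t => pvKey p t == j))[r]?) :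
    L = (pvTarget p T).map some := by
  have aux : ∀ b, b ≤ 29 → L.take (pvOff p b T) =
      (((List.range b).map (fun j => T.filter (fun t => pvKey p t == j))).flatten).map some := by
    intro b
    induction b with
    | zero => intro _; simp [pvOff]
    | succ b ih =>
      intro hb
      have hb' : b < 29 := by omega
      rw [pvOff_succ, List.take_add, ih (by omega)]
      rw [List.range_succ, List.map_append, List.flatten_append, List.map_append]
      congr 1
      simp only [List.map_cons, List.map_nil, List.flatten_cons, List.flatten_nil,
        List.append_nil]
      have hle : pvOff p b T + pvCnt p b T ≤ L.length := by
        rw [hlen, ← pvOff_total p T, ← pvOff_succ]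
        exact pvOff_mono p T (by omega)
      apply List.ext_getElem
      · rw [List.length_take, List.length_drop, List.length_map,
           ← pvCnt_eq_length_filter]
        omega
      · intro r h1 h2
        have hr : r < pvCnt p b T := by
          rw [List.length_map, ← pvCnt_eq_length_filter] at h2; exact h2
        have hidx : pvOff p b T + r < L.length := by omega
        have hp := hplaced b hb' r hr
        rw [List.getD_eq_getElem _ _ hidx] at hp
        rw [List.getElem?_eq_getElem (by rw [← pvCnt_eq_length_filter]; exact hr)] at hp
        rw [List.getElem_take, List.getElem_drop, List.getElem_map, hp]
  have := aux 29 (le_refl _)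
  rw [pvOff_total p T, ← hlen, List.take_length] at this
  rw [this]
  rfl

lemma alt_eq_target (T : List String) (p : Int) (hok : ∀ t ∈ T, pvOk p t) :
    counting_on_position_alt T p = pvTarget p T := by
  unfold counting_on_position_alt
  dsimp only
  have hrepl : (((122:Int) - 97 + 2) + 2).toNat = 29 := by decide
  rw [hrepl]
  obtain ⟨hl, hv⟩ := bucketLoop p T (List.replicate 29 []) (by simp) hok
  rw [PySem.List.foldl_append_eq_flatten]
  rw [List.nil_append]
  congr 1
  apply List.ext_getElem
  · rw [hl, List.length_map, List.length_range]
  · intro j h1 h2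
    rw [List.getElem_map, List.getElem_range]
    have hj : j < 29 := by rw [hl] at h1; exact h1
    have := hv j hj
    rw [List.getD_eq_getElem _ _ h1] at this
    rw [this, List.getD_eq_getElem _ _ (by rw [List.length_replicate]; exact hj),
        List.getElem_replicate, List.nil_append]

lemma a_eq_target (T : List String) (p : Int) (hok : ∀ t ∈ T, pvOk p t) :
    counting_on_position T p = pvTarget p T := by
  unfold counting_on_position
  dsimp only
  have hrepl : (((122:Int) - 97 + 2) + 2).toNat = 29 := by decide
  rw [hrepl]
  obtain ⟨h1l, h1v⟩ := countLoop p T (List.replicate 29 0) (by simp) hok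
  rw [h1l]
  set M1 := T.foldl (pvCountStep p) (List.replicate 29 0) with hM1def
  obtain ⟨h2l, h2v⟩ := prefixLoop 29 (by omega) (le_refl _) M1 h1l
  set M2 := (PySem.List.pyRange 1 ((29:Nat) : Int) 1).foldl pvPrefixStep M1 with hM2def
  have hM2 : ∀ j, j < 29 → M2.getD j 0 = ((pvOff p (j+1) T : Nat) : Int) := by
    intro j hj
    rw [h2v j hj, if_pos hj]
    have hmap : (List.range (j+1)).map (fun j' => M1.getD j' 0) =
        (List.range (j+1)).map (fun j' => ((pvCnt p j' T : Nat) : Int)) := by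
      apply List.map_congr_left
      intro j' hj'
      have hj'29 : j' < 29 := by
        have := List.mem_range.mp hj'; omega
      rw [h1v j' hj'29]
      have : (List.replicate 29 (0:Int)).getD j' 0 = 0 := by
        rw [List.getD_eq_getElem _ _ (by rw [List.length_replicate]; exact hj'29),
            List.getElem_replicate]
      rw [this, zero_add]
    rw [hmap]
    unfold pvOff
    push_cast
    rw [List.map_map]
    rfl
  rw [pyRange_rev T.length]
  rw [List.foldl_map, List.foldl_reverse]
  rw [foldr_index p T]
  have hA0len : (List.replicate T.length (none : Option String)).length = T.length := by
    simp
  obtain ⟨hfl, hLlen, hfv, hplace⟩ := placeLoop p T M2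
      (List.replicate T.length none) h2l hok
    (by
      intro j1 j2 h12 h2
      rw [hM2 j1 (by omega), hM2 j2 h2]
      have h1 : pvOff p (j1+1) T ≤ pvOff p j2 T := pvOff_mono p T (by omega)
      have h2' : pvOff p (j2+1) T = pvOff p j2 T + pvCnt p j2 T := pvOff_succ p j2 T
      omega)
    (by
      intro j hj
      rw [hM2 j hj]
      have h2' : pvOff p (j+1) T = pvOff p j T + pvCnt p j T := pvOff_succ p j T
      omega)
    (by
      intro j hj
      rw [hM2 j hj, hA0len]
      have h1 : pvOff p (j+1) T ≤ pvOff p 29 T := pvOff_mono p T (by omega)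
      rw [pvOff_total p T] at h1
      omega)
  rw [hA0len] at hLlen
  rw [assemble p T _ hLlen (by
    intro j hj r hr
    have hp := hplace j hj r hr
    have hidx : ((M2.getD j 0 - (pvCnt p j T : Int) + (r : Nat)).toNat) = pvOff p j T + r := by
      rw [hM2 j hj]
      have h2' : pvOff p (j+1) T = pvOff p j T + pvCnt p j T := pvOff_succ p j T
      omega
    rw [hidx] at hp
    exact hp)]
  rw [List.map_map]
  have : (fun o : Option String => o.getD "") ∘ some = id := by
    funext x; rfl
  rw [this, List.map_id]

-- ===== VERDICT (by name: the statement is the Claim_ definition above) =====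
theorem counting_on_position_spec : Claim_equal_counting_on_position := by
  intro T p _hdom hpre
  unfold Spec_counting_on_position
  have hok : ∀ t ∈ T, pvOk p t := fun t ht => hpre t ht
  rw [a_eq_target T p hok, alt_eq_target T p hok]
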